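-- pv_equiv track=rewrite | github.com/thorvaldhrafn/zabbix-nginx-logs | scripts/nginx_acc_logs.py | check_sname
-- ===== SOURCE A (Python) =====
-- def check_sname(d_f_check0):
--     checker = 0
--     s_names = ""
--     for n in d_f_check0:
--         if n["directive"] == "server_name":
--             s_names = n["args"]
--             checker = 1
--     return checker, s_names
-- ===== SOURCE B (Python) =====
-- def check_sname(d_f_check0):
--     for n in reversed(d_f_check0):
--         if n["directive"] == "server_name":
--             return 1, n["args"]
--     return 0, ""
-- ===== Notes on version B (the rewrite author's own statement) =====
-- stated objective: idiomatic
-- what changed: B scans the list in reverse and returns immediately on the first server_name directive, instead of A's forward last-wins scan with accumulator variables.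
import Mathlib
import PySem

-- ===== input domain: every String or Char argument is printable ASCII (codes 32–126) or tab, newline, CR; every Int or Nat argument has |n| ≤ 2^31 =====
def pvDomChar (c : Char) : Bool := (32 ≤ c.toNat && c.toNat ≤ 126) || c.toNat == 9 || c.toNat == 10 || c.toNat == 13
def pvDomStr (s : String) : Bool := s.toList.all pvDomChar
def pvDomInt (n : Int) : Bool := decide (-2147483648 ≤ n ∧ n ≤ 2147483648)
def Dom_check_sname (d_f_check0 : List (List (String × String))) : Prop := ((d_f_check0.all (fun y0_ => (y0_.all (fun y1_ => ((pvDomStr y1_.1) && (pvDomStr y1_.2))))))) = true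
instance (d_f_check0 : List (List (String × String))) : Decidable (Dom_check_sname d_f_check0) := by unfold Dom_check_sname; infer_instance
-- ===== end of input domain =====

-- B replaces A's forward last-wins scan with accumulators by a reverse scan that
-- returns on the first server_name directive (idiomatic, same cost).

-- ===== PORT A =====
-- A: forward fold keeping (checker, s_names); every match overwrites the state.
def check_sname (d_f_check0 : List (List (String × String))) : Int × String :=
  d_f_check0.foldl
    (fun (st : Int × String) n =>
      if PySem.Dict.getD (PySem.Dict.mk n) "directive" "" = "server_name" then
        (1, PySem.Dict.getD (PySem.Dict.mk n) "args" "")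
      else st)
    (0, "")

-- ===== PORT B =====
-- B: walk the reversed list, return at the first server_name directive.
def check_sname_alt_go (l : List (List (String × String))) : Int × String :=
  match l with
  | [] => (0, "")
  | n :: rest =>
    if PySem.Dict.getD (PySem.Dict.mk n) "directive" "" = "server_name" then
      (1, PySem.Dict.getD (PySem.Dict.mk n) "args" "")
    else check_sname_alt_go rest

def check_sname_alt (d_f_check0 : List (List (String × String))) : Int × String :=
  check_sname_alt_go d_f_check0.reverse

-- ===== PRECONDITION & SPEC =====
-- Pre_ excludes exactly the inputs where Python A raises KeyError: an element
-- without a "directive" key, or a server_name element without an "args" key.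
def Pre_check_sname (d_f_check0 : List (List (String × String))) : Prop :=
  ∀ n ∈ d_f_check0,
    PySem.Dict.contains (PySem.Dict.mk n) "directive" = true ∧
    (PySem.Dict.getD (PySem.Dict.mk n) "directive" "" = "server_name" →
      PySem.Dict.contains (PySem.Dict.mk n) "args" = true)
instance (d_f_check0 : List (List (String × String))) : Decidable (Pre_check_sname d_f_check0) := by unfold Pre_check_sname; infer_instance

def pvWitness_check_sname : (List (List (String × String))) :=
  [[("directive", "listen"), ("args", "80")],
   [("directive", "server_name"), ("args", "example.com")]]

def Spec_check_sname (d_f_check0 : List (List (String × String))) (out : Int × String) : Prop := out = check_sname_alt d_f_check0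
instance (d_f_check0 : List (List (String × String))) (out : Int × String) : Decidable (Spec_check_sname d_f_check0 out) := by unfold Spec_check_sname; infer_instance

-- ===== CLAIM (what is proved, stated in full; the proofs are below) =====
def Claim_equal_check_sname : Prop := ∀ (d_f_check0 : List (List (String × String))), Dom_check_sname d_f_check0 → Pre_check_sname d_f_check0 → Spec_check_sname d_f_check0 (check_sname d_f_check0)

-- ===== LEMMAS AND PROOFS =====

-- reverse-scan of r ++ [n]: falls through to n when r has no match …
lemma go_append_no_match (n : List (String × String))
    (r : List (List (String × String)))
    (hf : r.any (fun m => PySem.Dict.getD (PySem.Dict.mk m) "directive" "" = "server_name") = false) :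
    check_sname_alt_go (r ++ [n])
      = if PySem.Dict.getD (PySem.Dict.mk n) "directive" "" = "server_name"
        then (1, PySem.Dict.getD (PySem.Dict.mk n) "args" "")
        else (0, "") := by
  induction r with
  | nil => simp [check_sname_alt_go]
  | cons m r ihr =>
    simp only [List.any_cons, Bool.or_eq_false_iff] at hf
    simp only [List.cons_append, check_sname_alt_go]
    rw [if_neg (by simpa using hf.1), ihr hf.2]

-- … and never reaches n when r already has a match.
lemma go_append_match (n : List (String × String))
    (r : List (List (String × String)))
    (ht : r.any (fun m => PySem.Dict.getD (PySem.Dict.mk m) "directive" "" = "server_name") = true) :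
    check_sname_alt_go (r ++ [n]) = check_sname_alt_go r := by
  induction r with
  | nil => simp at ht
  | cons m r ihr =>
    simp only [List.cons_append, check_sname_alt_go]
    by_cases hm : PySem.Dict.getD (PySem.Dict.mk m) "directive" "" = "server_name"
    · simp [hm]
    · simp only [List.any_cons] at ht
      rw [if_neg hm, if_neg hm, ihr (by simpa [hm] using ht)]

-- key lemma: folding A's step forward over l, from any start state st, yields
-- B's reverse scan of l when that scan finds a match, and st otherwise.
lemma foldl_eq_rev_go (l : List (List (String × String))) :
    ∀ st : Int × String,
      l.foldl
        (fun (st : Int × String) n =>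
          if PySem.Dict.getD (PySem.Dict.mk n) "directive" "" = "server_name" then
            (1, PySem.Dict.getD (PySem.Dict.mk n) "args" "")
          else st) st
      = if l.reverse.any (fun n => PySem.Dict.getD (PySem.Dict.mk n) "directive" "" = "server_name")
        then check_sname_alt_go l.reverse
        else st := by
  induction l with
  | nil => intro st; simp
  | cons n rest ih =>
    intro st
    simp only [List.foldl_cons, List.reverse_cons, ih]
    by_cases hr : rest.reverse.any (fun m => PySem.Dict.getD (PySem.Dict.mk m) "directive" "" = "server_name") = true
    · rw [go_append_match n _ hr]
      by_cases h : PySem.Dict.getD (PySem.Dict.mk n) "directive" "" = "server_name" <;>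
        simp [h, hr]
    · simp only [Bool.not_eq_true] at hr
      rw [go_append_no_match n _ hr]
      by_cases h : PySem.Dict.getD (PySem.Dict.mk n) "directive" "" = "server_name" <;>
        simp [h, hr]

lemma go_no_match (l : List (List (String × String)))
    (hf : l.any (fun n => PySem.Dict.getD (PySem.Dict.mk n) "directive" "" = "server_name") = false) :
    check_sname_alt_go l = (0, "") := by
  induction l with
  | nil => rfl
  | cons m r ihr =>
    simp only [List.any_cons, Bool.or_eq_false_iff] at hf
    simp only [check_sname_alt_go]
    rw [if_neg (by simpa using hf.1), ihr hf.2]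

-- ===== VERDICT (by name: the statement is the Claim_ definition above) =====
theorem check_sname_spec : Claim_equal_check_sname := by
  intro l _ _
  show check_sname l = check_sname_alt l
  unfold check_sname check_sname_alt
  rw [foldl_eq_rev_go]
  by_cases hr : l.reverse.any (fun n => PySem.Dict.getD (PySem.Dict.mk n) "directive" "" = "server_name") = true
  · simp [hr]
  · simp only [Bool.not_eq_true] at hr
    rw [if_neg (by simp [hr]), go_no_match _ hr]
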